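-- pv_equiv track=rewrite | github.com/Kyle-Meyer/Interweaving-Python | signal_untangler/algorithm.py | is_interweaving
-- ===== SOURCE A (Python) =====
-- from collections import deque
--
-- def is_interweaving(s, x, y):
--     # Handle edge cases
--     if not s or not x or not y:
--         return False
--
--     # Check if x and y are both strings of 0s and 1s
--     if any(c not in '01' for c in x) or any(c not in '01' for c in y):
--         return False
--
--     # Initialize counters for x and y patterns
--     x_pos = 0
--     y_pos = 0
--     x_len = len(x)
--     y_len = len(y)
--
--     # Initialize comparison count for complexity analysis
--     comparisons = 0
--
--     # Use dynamic programming to solve this problem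
--     # dp[i][j] = True if we can match s[0:i] using x_pos=j and some y_pos
--     # We'll use a dictionary to save space (sparse matrix)
--     dp = {}
--
--     # Initialize visited set to avoid cycles
--     visited = set()
--
--     # BFS approach for efficiency
--     queue = deque([(0, 0, 0)])  # (s_pos, x_pos, y_pos)
--
--     while queue:
--         s_pos, x_pos, y_pos = queue.popleft()
--
--         # If we've processed the entire string s, we have a valid interweaving
--         if s_pos == len(s):
--             return True
--
--         # Skip if we've already visited this state
--         state = (s_pos, x_pos, y_pos)
--         if state in visited:
--             continue
--
--         visited.add(state)
--
--         # Try matching with x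
--         comparisons += 1
--         if s[s_pos] == x[x_pos]:
--             next_x_pos = (x_pos + 1) % x_len
--             queue.append((s_pos + 1, next_x_pos, y_pos))
--
--         # Try matching with y
--         comparisons += 1
--         if s[s_pos] == y[y_pos]:
--             next_y_pos = (y_pos + 1) % y_len
--             queue.append((s_pos + 1, x_pos, next_y_pos))
--
--     # If we exhaust all possibilities without matching the entire string, return False
--     return False
-- ===== SOURCE B (Python) =====
-- def is_interweaving(s, x, y):
--     # Layered set DP: front = set of (x_pos, y_pos) states reachable after
--     # consuming a prefix of s; no queue, no global visited set.
--     if not s or not x or not y: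
--         return False
--     if any(c not in '01' for c in x) or any(c not in '01' for c in y):
--         return False
--     x_len, y_len = len(x), len(y)
--     front = {(0, 0)}
--     for c in s:
--         nxt = set()
--         for i, j in front:
--             if c == x[i]:
--                 nxt.add(((i + 1) % x_len, j))
--             if c == y[j]:
--                 nxt.add((i, (j + 1) % y_len))
--         front = nxt
--     return bool(front)
-- ===== Notes on version B (the rewrite author's own statement) =====
-- stated objective: alternative
-- what changed: Replaced the BFS over a deque of (s_pos,x_pos,y_pos) states with a global visited set by a forward layered DP: one fold over s maintaining only the set of (x_pos,y_pos) states reachable at the current position, answering by non-emptiness of the final frontier.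
import Mathlib
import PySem

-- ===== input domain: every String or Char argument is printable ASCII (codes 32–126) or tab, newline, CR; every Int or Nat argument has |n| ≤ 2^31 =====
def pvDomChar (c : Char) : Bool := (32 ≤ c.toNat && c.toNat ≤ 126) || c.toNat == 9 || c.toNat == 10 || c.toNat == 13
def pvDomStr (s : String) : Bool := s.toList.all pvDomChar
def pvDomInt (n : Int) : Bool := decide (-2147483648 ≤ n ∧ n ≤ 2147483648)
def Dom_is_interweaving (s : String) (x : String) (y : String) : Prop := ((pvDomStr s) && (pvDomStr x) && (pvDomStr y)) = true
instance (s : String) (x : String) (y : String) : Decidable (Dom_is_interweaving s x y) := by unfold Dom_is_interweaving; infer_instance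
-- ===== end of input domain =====

-- B replaces A's BFS queue + global visited set by a single fold over s that keeps
-- only the frontier set of (x_pos, y_pos) states; same return value everywhere (alternative decomposition).

-- ===== PORT A =====
-- the two `if` appends of A's loop body (try x, then try y); indices are always in
-- range (x_pos/y_pos stay < len by %, s_pos < len here), so getD with a dummy default is exact
def succsA (sl xs ys : List Char) (st : Nat × Nat × Nat) : List (Nat × Nat × Nat) :=
  let c := sl.getD st.1 ' '
  (if c = xs.getD st.2.1 ' ' then [(st.1 + 1, (st.2.1 + 1) % xs.length, st.2.2)] else []) ++
  (if c = ys.getD st.2.2 ' ' then [(st.1 + 1, st.2.1, (st.2.2 + 1) % ys.length)] else [])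

-- A's `while queue` loop; the fuel argument is a totality guard only (Lean needs a
-- decreasing argument); it is proved sufficient below (lemma bfsA_correct), so behaviour matches Python
def bfsA (sl xs ys : List Char) : Nat → List (Nat × Nat × Nat) → PySem.Set (Nat × Nat × Nat) → Bool
  | 0, _, _ => false
  | _ + 1, [], _ => false
  | fuel + 1, st :: q, visited =>
    if st.1 = sl.length then true
    else if PySem.Set.contains visited st then bfsA sl xs ys fuel q visited
    else bfsA sl xs ys fuel (q ++ succsA sl xs ys st) (PySem.Set.add visited st)

def is_interweaving (s : String) (x : String) (y : String) : Bool :=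
  let sl := s.toList
  let xs := x.toList
  let ys := y.toList
  -- if not s or not x or not y: return False
  if sl.isEmpty || xs.isEmpty || ys.isEmpty then false
  -- if any(c not in '01' for c in x) or any(c not in '01' for c in y): return False
  else if xs.any (fun c => !(c == '0' || c == '1')) || ys.any (fun c => !(c == '0' || c == '1')) then false
  else bfsA sl xs ys (1 + 2 * (sl.length * xs.length * ys.length)) [(0, 0, 0)] PySem.Set.empty

-- ===== PORT B =====
-- B's inner loop: fold the current frontier into the next frontier set
def stepB (xs ys : List Char) (fr : PySem.Set (Nat × Nat)) (c : Char) : PySem.Set (Nat × Nat) :=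
  fr.foldl (fun nxt ij =>
    let nxt1 := if c = xs.getD ij.1 ' ' then PySem.Set.add nxt ((ij.1 + 1) % xs.length, ij.2) else nxt
    if c = ys.getD ij.2 ' ' then PySem.Set.add nxt1 (ij.1, (ij.2 + 1) % ys.length) else nxt1)
    PySem.Set.empty

def is_interweaving_alt (s : String) (x : String) (y : String) : Bool :=
  let sl := s.toList
  let xs := x.toList
  let ys := y.toList
  if sl.isEmpty || xs.isEmpty || ys.isEmpty then false
  else if xs.any (fun c => !(c == '0' || c == '1')) || ys.any (fun c => !(c == '0' || c == '1')) then false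
  else
    -- front = {(0,0)}; for c in s: front = step(front, c); return bool(front)
    !(sl.foldl (stepB xs ys) (PySem.Set.ofList [(0, 0)])).isEmpty

-- ===== PRECONDITION & SPEC =====
def Spec_is_interweaving (s : String) (x : String) (y : String) (out : Bool) : Prop := out = is_interweaving_alt s x y
instance (s : String) (x : String) (y : String) (out : Bool) : Decidable (Spec_is_interweaving s x y out) := by unfold Spec_is_interweaving; infer_instance

-- ===== CLAIM (what is proved, stated in full; the proofs are below) =====
def Claim_equal_is_interweaving : Prop := ∀ (s : String) (x : String) (y : String), Dom_is_interweaving s x y → Spec_is_interweaving s x y (is_interweaving s x y)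

-- ===== LEMMAS AND PROOFS =====

-- reference predicate: "the remaining characters cs can be produced from pattern positions (i, j)"
def mtch : List Char → List Char → List Char → Nat → Nat → Bool
  | [], _, _, _, _ => true
  | c :: cs, xs, ys, i, j =>
    ((c == xs.getD i ' ') && mtch cs xs ys ((i + 1) % xs.length) j) ||
    ((c == ys.getD j ' ') && mtch cs xs ys i ((j + 1) % ys.length))

-- the (x_pos, y_pos) successors of a frontier state on character c
def nexts (xs ys : List Char) (c : Char) (ij : Nat × Nat) : List (Nat × Nat) :=
  (if c = xs.getD ij.1 ' ' then [((ij.1 + 1) % xs.length, ij.2)] else []) ++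
  (if c = ys.getD ij.2 ' ' then [(ij.1, (ij.2 + 1) % ys.length)] else [])

lemma succsA_eq_map (sl xs ys : List Char) (st : Nat × Nat × Nat) :
    succsA sl xs ys st = (nexts xs ys (sl.getD st.1 ' ') (st.2.1, st.2.2)).map (fun p => (st.1 + 1, p.1, p.2)) := by
  obtain ⟨k, i, j⟩ := st
  simp only [succsA, nexts]
  split_ifs <;> simp

lemma mtch_cons (xs ys : List Char) (c : Char) (cs : List Char) (i j : Nat) :
    mtch (c :: cs) xs ys i j = true ↔ ∃ p ∈ nexts xs ys c (i, j), mtch cs xs ys p.1 p.2 = true := by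
  simp only [mtch, Bool.or_eq_true, Bool.and_eq_true, beq_iff_eq, nexts]
  constructor
  · rintro (⟨h, hm⟩ | ⟨h, hm⟩)
    · exact ⟨((i + 1) % xs.length, j), by simp [h], hm⟩
    · exact ⟨(i, (j + 1) % ys.length), by simp [h], hm⟩
  · rintro ⟨p, hp, hm⟩
    rcases List.mem_append.mp hp with h | h <;> rw [List.mem_ite_nil_right] at h <;>
      obtain ⟨hc, hmem⟩ := h <;> rw [List.mem_singleton] at hmem <;> subst hmem
    · exact Or.inl ⟨hc, hm⟩
    · exact Or.inr ⟨hc, hm⟩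

lemma succsA_fst {sl xs ys : List Char} {st u : Nat × Nat × Nat} (h : u ∈ succsA sl xs ys st) :
    u.1 = st.1 + 1 := by
  rw [succsA_eq_map] at h
  obtain ⟨p, -, rfl⟩ := List.mem_map.mp h
  rfl

lemma nexts_bounds {xs ys : List Char} {c : Char} {ij p : Nat × Nat}
    (hx : 0 < xs.length) (hy : 0 < ys.length) (hi : ij.1 < xs.length) (hj : ij.2 < ys.length)
    (h : p ∈ nexts xs ys c ij) : p.1 < xs.length ∧ p.2 < ys.length := by
  simp only [nexts, List.mem_append] at h
  rcases h with h | h <;> rw [List.mem_ite_nil_right] at h <;>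
    obtain ⟨-, hmem⟩ := h <;> rw [List.mem_singleton] at hmem <;> subst hmem
  · exact ⟨Nat.mod_lt _ hx, hj⟩
  · exact ⟨hi, Nat.mod_lt _ hy⟩

lemma succsA_bounds {sl xs ys : List Char} {st u : Nat × Nat × Nat}
    (hx : 0 < xs.length) (hy : 0 < ys.length) (hi : st.2.1 < xs.length) (hj : st.2.2 < ys.length)
    (h : u ∈ succsA sl xs ys st) : u.2.1 < xs.length ∧ u.2.2 < ys.length := by
  rw [succsA_eq_map] at h
  obtain ⟨p, hp, rfl⟩ := List.mem_map.mp h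
  exact nexts_bounds hx hy hi hj hp

lemma succsA_length_le (sl xs ys : List Char) (st : Nat × Nat × Nat) :
    (succsA sl xs ys st).length ≤ 2 := by
  simp only [succsA]
  split_ifs <;> simp

-- position k of s matches from (i, j) iff some successor state matches the rest
lemma mtch_drop_succ {sl : List Char} (xs ys : List Char) {k : Nat} (i j : Nat) (hk : k < sl.length) :
    mtch (sl.drop k) xs ys i j = true ↔
      ∃ u ∈ succsA sl xs ys (k, i, j), mtch (sl.drop u.1) xs ys u.2.1 u.2.2 = true := by
  rw [List.drop_eq_getElem_cons hk, mtch_cons, succsA_eq_map]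
  have hg : sl.getD k ' ' = sl[k] := List.getD_eq_getElem sl ' ' hk
  constructor
  · rintro ⟨p, hp, hm⟩
    exact ⟨(k + 1, p.1, p.2), List.mem_map.mpr ⟨p, by rwa [hg], rfl⟩, hm⟩
  · rintro ⟨u, hu, hm⟩
    obtain ⟨p, hp, rfl⟩ := List.mem_map.mp hu
    exact ⟨p, by rwa [hg] at hp, hm⟩

-- a matching state buried in the visited set can always be traded for one still on the queue
lemma escape (sl xs ys : List Char) (V Q : List (Nat × Nat × Nat))
    (hval : ∀ v ∈ V, v.1 < sl.length)
    (hclo : ∀ v ∈ V, ∀ u ∈ succsA sl xs ys v, u ∈ V ∨ u ∈ Q) :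
    ∀ d, ∀ v ∈ V, sl.length - v.1 ≤ d → mtch (sl.drop v.1) xs ys v.2.1 v.2.2 = true →
      ∃ w ∈ Q, mtch (sl.drop w.1) xs ys w.2.1 w.2.2 = true := by
  intro d
  induction d with
  | zero => intro v hv hd _; have := hval v hv; omega
  | succ d ih =>
    intro v hv hd hm
    have hk : v.1 < sl.length := hval v hv
    obtain ⟨u, hu, hum⟩ := (mtch_drop_succ xs ys v.2.1 v.2.2 hk).mp hm
    rcases hclo v hv u hu with huV | huQ
    · exact ih u huV (by have := succsA_fst hu; omega) hum
    · exact ⟨u, huQ, hum⟩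

-- any Nodup list of in-bounds states has at most n·a·b elements
lemma states_card {n a b : Nat} {V : List (Nat × Nat × Nat)} (hnd : V.Nodup)
    (hsub : ∀ v ∈ V, v.1 < n ∧ v.2.1 < a ∧ v.2.2 < b) : V.length ≤ n * a * b := by
  have hsubset : V ⊆ (List.range n) ×ˢ ((List.range a) ×ˢ (List.range b)) := by
    intro v hv
    obtain ⟨h1, h2, h3⟩ := hsub v hv
    obtain ⟨k, i, j⟩ := v
    simp only [SProd.sprod, List.pair_mem_product, List.mem_range]
    exact ⟨h1, h2, h3⟩
  have hle := (List.subperm_of_subset hnd hsubset).length_le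
  have hlen : ((List.range n) ×ˢ ((List.range a) ×ˢ (List.range b))).length = n * (a * b) := by
    rw [List.length_product, List.length_product, List.length_range, List.length_range,
      List.length_range]
  rw [hlen] at hle
  rw [Nat.mul_assoc]
  exact hle

-- BFS worklist correctness: under the loop invariant and enough fuel, the BFS answers
-- "some queued state can finish matching s"
lemma bfsA_correct (sl xs ys : List Char) (hx : 0 < xs.length) (hy : 0 < ys.length)
    (fuel : Nat) (queue : List (Nat × Nat × Nat)) (visited : PySem.Set (Nat × Nat × Nat))
    (hnd : visited.Nodup)
    (hq : ∀ st ∈ queue, st.1 ≤ sl.length ∧ st.2.1 < xs.length ∧ st.2.2 < ys.length)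
    (hv : ∀ v ∈ visited, v.1 < sl.length ∧ v.2.1 < xs.length ∧ v.2.2 < ys.length)
    (hclo : ∀ v ∈ visited, ∀ u ∈ succsA sl xs ys v, u ∈ visited ∨ u ∈ queue)
    (hfuel : queue.length + 2 * (sl.length * xs.length * ys.length - visited.length) ≤ fuel) :
    (bfsA sl xs ys fuel queue visited = true ↔
      ∃ st ∈ queue, mtch (sl.drop st.1) xs ys st.2.1 st.2.2 = true) := by
  induction fuel generalizing queue visited with
  | zero =>
    have : queue = [] := List.eq_nil_of_length_eq_zero (by omega)
    subst this; simp [bfsA]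
  | succ fuel ih =>
    match queue, hq, hclo, hfuel with
    | [], _, _, _ => simp [bfsA]
    | st :: q, hq, hclo, hfuel =>
      simp only [bfsA]
      by_cases hgoal : st.1 = sl.length
      · rw [if_pos hgoal]
        constructor
        · intro _
          exact ⟨st, List.mem_cons_self .., by rw [hgoal, List.drop_length]; rfl⟩
        · intro _; rfl
      · rw [if_neg hgoal]
        by_cases hvis : PySem.Set.contains visited st = true
        · rw [if_pos hvis]
          have hstV : st ∈ visited := (PySem.Set.contains_iff visited st).mp hvis
          have hclo' : ∀ v ∈ visited, ∀ u ∈ succsA sl xs ys v, u ∈ visited ∨ u ∈ q := by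
            intro v hvv u hu
            rcases hclo v hvv u hu with h | h
            · exact Or.inl h
            · rcases List.mem_cons.mp h with rfl | h
              · exact Or.inl hstV
              · exact Or.inr h
          rw [ih q visited hnd (fun a ha => hq a (List.mem_cons_of_mem _ ha)) hv hclo'
            (by simp at hfuel ⊢; omega)]
          constructor
          · rintro ⟨w, hw, hm⟩; exact ⟨w, List.mem_cons_of_mem _ hw, hm⟩
          · rintro ⟨w, hw, hm⟩
            rcases List.mem_cons.mp hw with rfl | hw
            · exact escape sl xs ys visited q (fun v h => (hv v h).1) hclo' sl.length w hstV
                (by omega) hm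
            · exact ⟨w, hw, hm⟩
        · rw [if_neg hvis]
          have hstNV : st ∉ visited := fun h => hvis ((PySem.Set.contains_iff visited st).mpr h)
          have hstb := hq st (List.mem_cons_self ..)
          have hstlt : st.1 < sl.length := lt_of_le_of_ne hstb.1 hgoal
          have hadd : PySem.Set.add visited st = visited ++ [st] := PySem.Set.add_of_not_mem hstNV
          have hnd' : (PySem.Set.add visited st).Nodup := PySem.Set.nodup_add visited st hnd
          have hv' : ∀ v ∈ PySem.Set.add visited st,
              v.1 < sl.length ∧ v.2.1 < xs.length ∧ v.2.2 < ys.length := by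
            intro v hmem
            rcases (PySem.Set.mem_add _ _ _).mp hmem with h | rfl
            · exact hv v h
            · exact ⟨hstlt, hstb.2.1, hstb.2.2⟩
          have hcard : visited.length + 1 ≤ sl.length * xs.length * ys.length := by
            have := states_card hnd' hv'
            rwa [hadd, List.length_append, List.length_cons, List.length_nil] at this
          have hq' : ∀ u ∈ q ++ succsA sl xs ys st,
              u.1 ≤ sl.length ∧ u.2.1 < xs.length ∧ u.2.2 < ys.length := by
            intro u hu
            rcases List.mem_append.mp hu with h | h
            · exact hq u (List.mem_cons_of_mem _ h)
            · have hb := succsA_bounds hx hy hstb.2.1 hstb.2.2 h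
              have := succsA_fst h
              exact ⟨by omega, hb.1, hb.2⟩
          have hclo' : ∀ v ∈ PySem.Set.add visited st, ∀ u ∈ succsA sl xs ys v,
              u ∈ PySem.Set.add visited st ∨ u ∈ q ++ succsA sl xs ys st := by
            intro v hvv u hu
            rcases (PySem.Set.mem_add _ _ _).mp hvv with hvv | rfl
            · rcases hclo v hvv u hu with h | h
              · exact Or.inl ((PySem.Set.mem_add _ _ _).mpr (Or.inl h))
              · rcases List.mem_cons.mp h with rfl | h
                · exact Or.inl ((PySem.Set.mem_add _ _ _).mpr (Or.inr rfl))
                · exact Or.inr (List.mem_append_left _ h)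
            · exact Or.inr (List.mem_append_right _ hu)
          have hfuel' : (q ++ succsA sl xs ys st).length +
              2 * (sl.length * xs.length * ys.length - (PySem.Set.add visited st).length) ≤ fuel := by
            have hs2 := succsA_length_le sl xs ys st
            rw [hadd]
            simp only [List.length_append, List.length_cons, List.length_nil] at hfuel ⊢
            omega
          rw [ih (q ++ succsA sl xs ys st) (PySem.Set.add visited st) hnd' hq' hv' hclo' hfuel']
          constructor
          · rintro ⟨w, hw, hm⟩
            rcases List.mem_append.mp hw with h | h
            · exact ⟨w, List.mem_cons_of_mem _ h, hm⟩
            · exact ⟨st, List.mem_cons_self ..,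
                (mtch_drop_succ xs ys st.2.1 st.2.2 hstlt).mpr ⟨w, h, hm⟩⟩
          · rintro ⟨w, hw, hm⟩
            rcases List.mem_cons.mp hw with rfl | h
            · obtain ⟨u, hu, hum⟩ := (mtch_drop_succ xs ys w.2.1 w.2.2 hstlt).mp hm
              exact ⟨u, List.mem_append_right _ hu, hum⟩
            · exact ⟨w, List.mem_append_left _ h, hm⟩

-- membership in B's inner fold
lemma mem_foldl_stepB (xs ys : List Char) (c : Char) :
    ∀ (l : List (Nat × Nat)) (acc : PySem.Set (Nat × Nat)) (p : Nat × Nat),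
      p ∈ l.foldl (fun nxt ij =>
        let nxt1 := if c = xs.getD ij.1 ' ' then PySem.Set.add nxt ((ij.1 + 1) % xs.length, ij.2) else nxt
        if c = ys.getD ij.2 ' ' then PySem.Set.add nxt1 (ij.1, (ij.2 + 1) % ys.length) else nxt1) acc ↔
      p ∈ acc ∨ ∃ ij ∈ l, p ∈ nexts xs ys c ij := by
  intro l
  induction l with
  | nil => simp
  | cons a l ih =>
    intro acc p
    rw [List.foldl_cons, ih]
    have hbody : p ∈ (let nxt1 := if c = xs.getD a.1 ' ' then PySem.Set.add acc ((a.1 + 1) % xs.length, a.2) else acc;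
        if c = ys.getD a.2 ' ' then PySem.Set.add nxt1 (a.1, (a.2 + 1) % ys.length) else nxt1) ↔
        p ∈ acc ∨ p ∈ nexts xs ys c a := by
      simp only [nexts]
      split_ifs <;> (simp [PySem.Set.mem_add]; try tauto)
    rw [hbody]
    simp only [List.mem_cons]
    constructor
    · rintro ((h | h) | ⟨ij, hij, h⟩)
      · exact Or.inl h
      · exact Or.inr ⟨a, Or.inl rfl, h⟩
      · exact Or.inr ⟨ij, Or.inr hij, h⟩
    · rintro (h | ⟨ij, (rfl | hij), h⟩)
      · exact Or.inl (Or.inl h)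
      · exact Or.inl (Or.inr h)
      · exact Or.inr ⟨ij, hij, h⟩

lemma mem_stepB (xs ys : List Char) (c : Char) (fr : PySem.Set (Nat × Nat)) (p : Nat × Nat) :
    p ∈ stepB xs ys fr c ↔ ∃ ij ∈ fr, p ∈ nexts xs ys c ij := by
  unfold stepB
  rw [mem_foldl_stepB]
  simp [PySem.Set.empty]

-- B's frontier fold is nonempty iff some current frontier state matches the rest of s
lemma frontB_spec (xs ys : List Char) :
    ∀ (cs : List Char) (fr : PySem.Set (Nat × Nat)),
      (cs.foldl (stepB xs ys) fr ≠ [] ↔ ∃ ij ∈ fr, mtch cs xs ys ij.1 ij.2 = true) := by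
  intro cs
  induction cs with
  | nil =>
    intro fr
    simp only [List.foldl_nil, mtch, and_true]
    rw [← List.isEmpty_eq_false_iff_exists_mem]
    simp
  | cons c cs ih =>
    intro fr
    rw [List.foldl_cons, ih]
    constructor
    · rintro ⟨p, hp, hm⟩
      obtain ⟨ij, hij, hpn⟩ := (mem_stepB xs ys c fr p).mp hp
      exact ⟨ij, hij, (mtch_cons xs ys c cs ij.1 ij.2).mpr ⟨p, hpn, hm⟩⟩
    · rintro ⟨ij, hij, hm⟩
      obtain ⟨p, hpn, hpm⟩ := (mtch_cons xs ys c cs ij.1 ij.2).mp hm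
      exact ⟨p, (mem_stepB xs ys c fr p).mpr ⟨ij, hij, hpn⟩, hpm⟩

-- ===== VERDICT (by name: the statement is the Claim_ definition above) =====
theorem is_interweaving_spec : Claim_equal_is_interweaving := by
  intro s x y _
  unfold Spec_is_interweaving is_interweaving is_interweaving_alt
  dsimp only
  split_ifs with h1 h2
  · rfl
  · rfl
  · rw [Bool.not_eq_true, Bool.or_eq_false_iff, Bool.or_eq_false_iff] at h1
    obtain ⟨⟨hse, hxe⟩, hye⟩ := h1
    have hx : 0 < x.toList.length :=
      List.length_pos_of_ne_nil (List.isEmpty_eq_false_iff.mp hxe)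
    have hy : 0 < y.toList.length :=
      List.length_pos_of_ne_nil (List.isEmpty_eq_false_iff.mp hye)
    have hA := bfsA_correct s.toList x.toList y.toList hx hy
      (1 + 2 * (s.toList.length * x.toList.length * y.toList.length))
      [(0, 0, 0)] PySem.Set.empty List.nodup_nil
      (by intro st hst; simp at hst; subst hst; exact ⟨Nat.zero_le _, hx, hy⟩)
      (by intro v hv; simp [PySem.Set.empty] at hv)
      (by intro v hv; simp [PySem.Set.empty] at hv)
      (by simp [PySem.Set.empty])
    have hof : PySem.Set.ofList [((0 : Nat), (0 : Nat))] = [(0, 0)] := rfl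
    have hB := frontB_spec x.toList y.toList s.toList (PySem.Set.ofList [(0, 0)])
    rw [hof] at hB
    simp only [List.mem_singleton] at hA hB
    have hA' : bfsA s.toList x.toList y.toList
        (1 + 2 * (s.toList.length * x.toList.length * y.toList.length)) [(0, 0, 0)]
        PySem.Set.empty = true ↔ mtch s.toList x.toList y.toList 0 0 = true := by
      rw [hA]
      constructor
      · rintro ⟨st, rfl, hm⟩; simpa using hm
      · intro hm; exact ⟨(0, 0, 0), rfl, by simpa using hm⟩
    have hB' : (s.toList.foldl (stepB x.toList y.toList) [(0, 0)] ≠ []) ↔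
        mtch s.toList x.toList y.toList 0 0 = true := by
      rw [hB]
      constructor
      · rintro ⟨ij, rfl, hm⟩; exact hm
      · intro hm; exact ⟨(0, 0), rfl, hm⟩
    rw [hof]
    rcases hm : mtch s.toList x.toList y.toList 0 0 with _ | _
    · have hAe : bfsA s.toList x.toList y.toList
          (1 + 2 * (s.toList.length * x.toList.length * y.toList.length)) [(0, 0, 0)]
          PySem.Set.empty = false := by
        rw [← Bool.not_eq_true, hA', hm]; simp
      have hBe : s.toList.foldl (stepB x.toList y.toList) [(0, 0)] = [] := by
        by_contra hne
        exact absurd (hB'.mp hne) (by simp [hm])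
      rw [hAe, hBe]; rfl
    · rw [hA'.mpr hm]
      have := hB'.mpr hm
      simp [this]
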